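-- pv_equiv track=rewrite | github.com/Rethy729/Rosalind_BA | BA9/BA9M/BA9M.py | count
-- ===== SOURCE A (Python) =====
-- def count(bwt_index):
--     count = []
--     for i in range(4):
--         count.append([0]*(len(bwt_index)+1))
--     count_a = 0
--     count_c = 0
--     count_g = 0
--     count_t = 0
--     for i, tuple in enumerate(bwt_index):
--         if tuple[0] == 'A':
--             count_a += 1
--         elif tuple[0] == 'C':
--             count_c += 1
--         elif tuple[0] == 'G':
--             count_g += 1
--         elif tuple[0] == 'T':
--             count_t += 1
--         count[0][i+1] = count_a
--         count[1][i+1] = count_c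
--         count[2][i+1] = count_g
--         count[3][i+1] = count_t
--     return count
-- ===== SOURCE B (Python) =====
-- def count(bwt_index):
--     result = []
--     for sym in ('A', 'C', 'G', 'T'):
--         acc = [0]
--         c = 0
--         for t in bwt_index:
--             if t[0] == sym:
--                 c += 1
--             acc.append(c)
--         result.append(acc)
--     return result
-- ===== Notes on version B (the rewrite author's own statement) =====
-- stated objective: idiomatic
-- what changed: Instead of one pass mutating four preallocated zero arrays via index assignment with four running counters, B makes one independent accumulation pass per symbol, appending a growing prefix-count list for each of A,C,G,T.
import Mathlib
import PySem

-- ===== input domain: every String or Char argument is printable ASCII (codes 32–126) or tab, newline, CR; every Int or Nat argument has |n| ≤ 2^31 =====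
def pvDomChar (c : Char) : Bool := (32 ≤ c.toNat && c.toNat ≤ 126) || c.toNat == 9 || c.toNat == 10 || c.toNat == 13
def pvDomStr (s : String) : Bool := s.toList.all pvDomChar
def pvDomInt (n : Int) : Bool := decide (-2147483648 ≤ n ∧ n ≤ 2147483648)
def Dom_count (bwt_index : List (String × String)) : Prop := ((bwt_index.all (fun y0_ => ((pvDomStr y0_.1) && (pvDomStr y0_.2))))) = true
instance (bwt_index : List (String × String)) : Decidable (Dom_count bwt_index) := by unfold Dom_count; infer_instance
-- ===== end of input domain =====

-- B replaces A's single mutating pass (four running counters writing into preallocated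
-- zero arrays) by four independent accumulation passes, one per symbol (idiomatic; same cost).


-- ===== PORT A =====
-- body of A's 'for i, tuple in enumerate(bwt_index)' loop; the index writes 'count[k][i+1] = …'
-- are List.modify/List.set ((i+1).toNat is exact: enumerate indices are ≥ 0, and i+1 ≤ len
-- is always in range of the length-(n+1) rows, so Python never raises here)
def countStep : (List (List Int) × Int × Int × Int × Int) → (Int × (String × String)) →
    (List (List Int) × Int × Int × Int × Int)
  | (cnt, ca, cc, cg, ct), (i, t) =>
    let (ca, cc, cg, ct) :=
      if t.1 == "A" then (ca + 1, cc, cg, ct)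
      else if t.1 == "C" then (ca, cc + 1, cg, ct)
      else if t.1 == "G" then (ca, cc, cg + 1, ct)
      else if t.1 == "T" then (ca, cc, cg, ct + 1)
      else (ca, cc, cg, ct)
    let cnt := cnt.modify 0 (fun r => r.set (i + 1).toNat ca)
    let cnt := cnt.modify 1 (fun r => r.set (i + 1).toNat cc)
    let cnt := cnt.modify 2 (fun r => r.set (i + 1).toNat cg)
    let cnt := cnt.modify 3 (fun r => r.set (i + 1).toNat ct)
    (cnt, ca, cc, cg, ct)

def count (bwt_index : List (String × String)) : List (List Int) :=
  -- for i in range(4): count.append([0]*(len(bwt_index)+1))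
  let cnt0 : List (List Int) :=
    (PySem.List.pyRange 0 4 1).foldl
      (fun acc _ => acc ++ [List.replicate (bwt_index.length + 1) (0 : Int)]) []
  let st := (PySem.List.enumerate bwt_index 0).foldl countStep (cnt0, 0, 0, 0, 0)
  st.1

-- ===== PORT B =====
-- B's inner loop: running counter c, appending the updated counter after each tuple
def altLoop (sym : String) : List (String × String) → Int → List Int
  | [], _ => []
  | t :: rest, c =>
    let c := if t.1 == sym then c + 1 else c
    c :: altLoop sym rest c

def count_alt (bwt_index : List (String × String)) : List (List Int) :=
  ["A", "C", "G", "T"].map (fun sym => 0 :: altLoop sym bwt_index 0)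

-- ===== PRECONDITION & SPEC =====
def Spec_count (bwt_index : List (String × String)) (out : List (List Int)) : Prop := out = count_alt bwt_index
instance (bwt_index : List (String × String)) (out : List (List Int)) : Decidable (Spec_count bwt_index out) := by unfold Spec_count; infer_instance

-- ===== CLAIM (what is proved, stated in full; the proofs are below) =====
def Claim_equal_count : Prop := ∀ (bwt_index : List (String × String)), Dom_count bwt_index → Spec_count bwt_index (count bwt_index)

-- ===== LEMMAS AND PROOFS =====

-- running counter of sym over a processed prefix
def ctrS (sym : String) (p : List (String × String)) : Int :=
  (p.countP (fun t => t.1 == sym) : Int)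

-- a row of A's array after the prefix p is processed, with suffix s still to come
def rowOf (sym : String) (p s : List (String × String)) : List Int :=
  (0 :: altLoop sym p 0) ++ List.replicate s.length (0 : Int)

lemma ctrS_snoc (sym : String) (p : List (String × String)) (h : String × String) :
    ctrS sym (p ++ [h]) = ctrS sym p + (if h.1 == sym then 1 else 0) := by
  simp [ctrS, List.countP_append, List.countP_cons]

lemma altLoop_snoc (sym : String) (p : List (String × String)) (h : String × String)
    (c : Int) : altLoop sym (p ++ [h]) c = altLoop sym p c ++ [c + ctrS sym (p ++ [h])] := by
  induction p generalizing c with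
  | nil =>
    have h1 : ctrS sym ([] ++ [h]) = if h.1 == sym then 1 else 0 := by
      rw [ctrS_snoc]; simp [ctrS]
    rw [h1]
    simp only [List.nil_append, altLoop]
    split <;> simp
  | cons t p ih =>
    simp only [List.cons_append, altLoop, ih]
    have h2 : ctrS sym (t :: (p ++ [h])) = ctrS sym (p ++ [h]) + (if t.1 == sym then 1 else 0) := by
      simp [ctrS, List.countP_cons, Int.add_comm]
    rw [h2]
    split <;> simp <;> ring_nf

lemma altLoop_length (sym : String) (p : List (String × String)) (c : Int) :
    (altLoop sym p c).length = p.length := by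
  induction p generalizing c with
  | nil => rfl
  | cons t p ih => simp [altLoop, ih]

lemma set_row (xs : List Int) (m : ℕ) (v : Int) :
    (xs ++ List.replicate (m + 1) (0 : Int)).set xs.length v
      = xs ++ v :: List.replicate m (0 : Int) := by
  simp [List.replicate_succ]

lemma rowOf_step (sym : String) (p s : List (String × String)) (h : String × String) :
    (rowOf sym p (h :: s)).set (p.length + 1) (ctrS sym (p ++ [h]))
      = rowOf sym (p ++ [h]) s := by
  have hl : (0 :: altLoop sym p 0).length = p.length + 1 := by simp [altLoop_length]
  calc (rowOf sym p (h :: s)).set (p.length + 1) (ctrS sym (p ++ [h]))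
      = ((0 :: altLoop sym p 0) ++ List.replicate (s.length + 1) (0 : Int)).set
          ((0 :: altLoop sym p 0)).length (ctrS sym (p ++ [h])) := by
        rw [hl]; rfl
    _ = (0 :: altLoop sym p 0) ++ ctrS sym (p ++ [h]) :: List.replicate s.length (0 : Int) := by
        rw [set_row]
    _ = rowOf sym (p ++ [h]) s := by
        simp [rowOf, altLoop_snoc, ctrS]

lemma inv (s : List (String × String)) : ∀ (p : List (String × String)),
    (PySem.List.enumerate s (p.length : Int)).foldl countStep
      ([rowOf "A" p s, rowOf "C" p s, rowOf "G" p s, rowOf "T" p s],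
        ctrS "A" p, ctrS "C" p, ctrS "G" p, ctrS "T" p)
    = ([rowOf "A" (p ++ s) [], rowOf "C" (p ++ s) [], rowOf "G" (p ++ s) [],
        rowOf "T" (p ++ s) []],
        ctrS "A" (p ++ s), ctrS "C" (p ++ s), ctrS "G" (p ++ s), ctrS "T" (p ++ s)) := by
  induction s with
  | nil => intro p; simp
  | cons h s ih =>
    intro p
    rw [PySem.List.enumerate_cons, List.foldl_cons]
    have hstep : countStep
        ([rowOf "A" p (h :: s), rowOf "C" p (h :: s), rowOf "G" p (h :: s),
          rowOf "T" p (h :: s)], ctrS "A" p, ctrS "C" p, ctrS "G" p, ctrS "T" p)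
        ((p.length : Int), h)
        = ([rowOf "A" (p ++ [h]) s, rowOf "C" (p ++ [h]) s, rowOf "G" (p ++ [h]) s,
            rowOf "T" (p ++ [h]) s],
            ctrS "A" (p ++ [h]), ctrS "C" (p ++ [h]), ctrS "G" (p ++ [h]),
            ctrS "T" (p ++ [h])) := by
      have htn : ((p.length : Int) + 1).toNat = p.length + 1 := by omega
      simp only [countStep, htn]
      rw [ctrS_snoc, ctrS_snoc, ctrS_snoc, ctrS_snoc]
      by_cases hA : h.1 = "A" <;> by_cases hC : h.1 = "C" <;> by_cases hG : h.1 = "G" <;>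
        by_cases hT : h.1 = "T" <;>
        simp_all [List.modify, ← rowOf_step, ctrS_snoc]
    rw [hstep]
    have := ih (p ++ [h])
    simp only [List.length_append, List.length_singleton] at this
    simpa [List.append_assoc] using this

lemma count_eq (bwt_index : List (String × String)) :
    count bwt_index = count_alt bwt_index := by
  have h0 : PySem.List.pyRange 0 4 1 = [0, 1, 2, 3] := by decide
  have hinv := inv bwt_index []
  simp only [List.length_nil, Int.natCast_zero, List.nil_append, rowOf, altLoop, ctrS,
    List.countP_nil, List.cons_append] at hinv
  simp [count, h0, List.foldl, count_alt, hinv, List.replicate_succ]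

-- ===== VERDICT (by name: the statement is the Claim_ definition above) =====
theorem count_spec : Claim_equal_count := by
  intro bwt_index _
  unfold Spec_count
  exact count_eq bwt_index
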